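-- pv_equiv track=rewrite | github.com/rjbatista/AoC | aoc/event2024/day22/solve.py | get_best_sequence
-- ===== SOURCE A (Python) =====
-- from collections import defaultdict
--
-- def get_best_sequence(numbers: list[int], count: int = 2000, seq_size: int = 4) -> tuple[int, tuple[int, ...]]:
--     """ Get the best sequence value """
--     total_for_seq = defaultdict(lambda: 0)
--
--     for number in numbers:
--         current_sequence = ()
--         last_digit = None
--         seen_sequences = set()
--         for _ in range(count):
--             number = (number << 6 ^ number) % 16777216
--             number = (number >> 5 ^ number) % 16777216
--             number = (number << 11 ^ number) % 16777216
--
--             digit = number % 10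
--             if last_digit is not None:
--                 diff = digit - last_digit
--                 current_sequence = (current_sequence + (diff,))[-seq_size:]
--
--                 if len(current_sequence) == seq_size and current_sequence not in seen_sequences:
--                     total_for_seq[current_sequence] += digit
--                     seen_sequences.add(current_sequence)
--
--             last_digit = digit
--
--     return max(total_for_seq.values())
-- ===== SOURCE B (Python) =====
-- def get_best_sequence(numbers: list[int], count: int = 2000, seq_size: int = 4) -> int:
--     """ Get the best sequence value """
--     total_for_seq = {}
--     last_buyer = {}
--
--     for idx, number in enumerate(numbers):
--         digits = []
--         n = number
--         for _ in range(count):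
--             n = (n << 6 ^ n) % 16777216
--             n = (n >> 5 ^ n) % 16777216
--             n = (n << 11 ^ n) % 16777216
--             digits.append(n % 10)
--         diffs = [digits[j + 1] - digits[j] for j in range(count - 1)]
--         for i in range(seq_size, count):
--             key = tuple(diffs[i - seq_size:i])
--             if last_buyer.get(key) != idx:
--                 last_buyer[key] = idx
--                 total_for_seq[key] = total_for_seq.get(key, 0) + digits[i]
--
--     return max(total_for_seq.values())
-- ===== Notes on version B (the rewrite author's own statement) =====
-- stated objective: alternative
-- what changed: Replaces A's per-buyer seen-set and rolling tuple slicing by a single global dict mapping each change sequence to the last buyer index that contributed it, iterating buyers with enumerate and sliding the window by integer index over a materialised digit/diff list.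
import Mathlib
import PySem

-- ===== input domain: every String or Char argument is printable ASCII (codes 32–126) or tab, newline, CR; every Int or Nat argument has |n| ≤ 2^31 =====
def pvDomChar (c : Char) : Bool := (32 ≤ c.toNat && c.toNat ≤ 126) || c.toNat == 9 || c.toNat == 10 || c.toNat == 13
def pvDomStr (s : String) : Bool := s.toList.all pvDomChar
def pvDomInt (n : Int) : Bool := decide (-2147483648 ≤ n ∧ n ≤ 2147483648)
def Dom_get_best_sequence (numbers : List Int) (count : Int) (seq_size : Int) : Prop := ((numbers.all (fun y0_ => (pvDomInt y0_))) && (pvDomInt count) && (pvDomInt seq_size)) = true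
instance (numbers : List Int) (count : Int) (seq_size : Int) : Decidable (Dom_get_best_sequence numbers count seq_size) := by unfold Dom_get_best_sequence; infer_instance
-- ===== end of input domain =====

-- B replaces A's per-buyer seen-set dedup by one global last-buyer-index dict and slides the
-- change window by integer index over a materialised digit list (objective: alternative).

-- ===== PORT A =====
-- the three secret-update lines, shared verbatim by both Pythons
def pvStep (n : Int) : Int :=
  let a := PySem.Int.mod (PySem.Int.bxor (n <<< (6:Nat)) n) 16777216
  let b := PySem.Int.mod (PySem.Int.bxor (a >>> (5:Nat)) a) 16777216
  PySem.Int.mod (PySem.Int.bxor (b <<< (11:Nat)) b) 16777216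

-- A-side helper: the body of A's inner `for _ in range(count)` loop
-- state = (number, current_sequence, last_digit, seen_sequences, total_for_seq)
def stepA (seq_size : Int)
    (st : Int × List Int × Option Int × PySem.Set (List Int) × PySem.Dict (List Int) Int) :
    Int × List Int × Option Int × PySem.Set (List Int) × PySem.Dict (List Int) Int :=
  let number := pvStep st.1
  let digit := PySem.Int.mod number 10
  match st.2.2.1 with
  | none => (number, st.2.1, some digit, st.2.2.2.1, st.2.2.2.2)
  | some last_digit =>
    let diff := digit - last_digit
    let cur := PySem.List.slice (st.2.1 ++ [diff]) (some (-seq_size)) none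
    if ((cur.length : Int) = seq_size ∧ PySem.Set.contains st.2.2.2.1 cur = false) then
      (number, cur, some digit, PySem.Set.add st.2.2.2.1 cur,
       PySem.Dict.modify st.2.2.2.2 cur 0 (· + digit))
    else
      (number, cur, some digit, st.2.2.2.1, st.2.2.2.2)

-- A-side helper: the body of A's `for number in numbers` loop
def buyerA (count seq_size : Int) (d : PySem.Dict (List Int) Int) (number : Int) :
    PySem.Dict (List Int) Int :=
  ((PySem.List.pyRange 0 count 1).foldl (fun st (_ : Int) => stepA seq_size st)
    (number, ([] : List Int), (none : Option Int),
     (PySem.Set.empty : PySem.Set (List Int)), d)).2.2.2.2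

def get_best_sequence (numbers : List Int) (count : Int) (seq_size : Int) : Int :=
  let total_for_seq := numbers.foldl (buyerA count seq_size)
    (PySem.Dict.empty : PySem.Dict (List Int) Int)
  match PySem.List.max? (PySem.Dict.values total_for_seq) id with
  | some v => v
  | none => 0  -- unreachable under Pre_: Python raises ValueError on max of an empty dict

-- ===== PORT B =====
-- B-side helper: one step of B's digit-generation loop (state = (n, digits))
def stepGen (q : Int × List Int) : Int × List Int :=
  let n := pvStep q.1
  (n, q.2 ++ [PySem.Int.mod n 10])

-- B-side helper: the body of B's `for i in range(seq_size, count)` loop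
-- state = (total_for_seq, last_buyer)
def stepB (idx : Int) (digits diffs : List Int) (seq_size : Int)
    (q : PySem.Dict (List Int) Int × PySem.Dict (List Int) Int) (i : Int) :
    PySem.Dict (List Int) Int × PySem.Dict (List Int) Int :=
  let key := PySem.List.slice diffs (some (i - seq_size)) (some i)
  if PySem.Dict.get? q.2 key ≠ some idx then
    (PySem.Dict.insert q.1 key (PySem.Dict.getD q.1 key 0 + PySem.List.pyGetD digits i 0),
     PySem.Dict.insert q.2 key idx)
  else q

-- B-side helper: the body of B's `for idx, number in enumerate(numbers)` loop
def buyerB (count seq_size : Int)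
    (st : PySem.Dict (List Int) Int × PySem.Dict (List Int) Int) (p : Int × Int) :
    PySem.Dict (List Int) Int × PySem.Dict (List Int) Int :=
  let digits := ((PySem.List.pyRange 0 count 1).foldl (fun q (_ : Int) => stepGen q)
    (p.2, ([] : List Int))).2
  let diffs := (PySem.List.pyRange 0 (count - 1) 1).map
    (fun j => PySem.List.pyGetD digits (j + 1) 0 - PySem.List.pyGetD digits j 0)
  (PySem.List.pyRange seq_size count 1).foldl (stepB p.1 digits diffs seq_size) st

def get_best_sequence_alt (numbers : List Int) (count : Int) (seq_size : Int) : Int :=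
  let st := (PySem.List.enumerate numbers 0).foldl (buyerB count seq_size)
    ((PySem.Dict.empty : PySem.Dict (List Int) Int),
     (PySem.Dict.empty : PySem.Dict (List Int) Int))
  match PySem.List.max? (PySem.Dict.values st.1) id with
  | some v => v
  | none => 0  -- unreachable under Pre_: Python raises ValueError on max of an empty dict

-- ===== PRECONDITION & SPEC =====
-- Pre_ holds exactly where Python A returns normally: otherwise no complete change window
-- ever forms, total_for_seq stays empty and max() raises ValueError.
def Pre_get_best_sequence (numbers : List Int) (count : Int) (seq_size : Int) : Prop :=
  numbers ≠ [] ∧ 1 ≤ seq_size ∧ seq_size + 1 ≤ count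
instance (numbers : List Int) (count : Int) (seq_size : Int) :
    Decidable (Pre_get_best_sequence numbers count seq_size) := by
  unfold Pre_get_best_sequence; infer_instance

def pvWitness_get_best_sequence : List Int × Int × Int := ([123], 6, 4)

def Spec_get_best_sequence (numbers : List Int) (count : Int) (seq_size : Int) (out : Int) : Prop := out = get_best_sequence_alt numbers count seq_size
instance (numbers : List Int) (count : Int) (seq_size : Int) (out : Int) : Decidable (Spec_get_best_sequence numbers count seq_size out) := by unfold Spec_get_best_sequence; infer_instance

-- ===== CLAIM (what is proved, stated in full; the proofs are below) =====
def Claim_equal_get_best_sequence : Prop := ∀ (numbers : List Int) (count : Int) (seq_size : Int), Dom_get_best_sequence numbers count seq_size → Pre_get_best_sequence numbers count seq_size → Spec_get_best_sequence numbers count seq_size (get_best_sequence numbers count seq_size)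

-- ===== LEMMAS AND PROOFS =====

-- t-th price digit of the buyer starting at n (t = 0 is the first generated secret)
def dSeq (n : Int) (t : Nat) : Int := PySem.Int.mod (pvStep^[t + 1] n) 10
-- j-th price difference
def dfSeq (n : Int) (j : Nat) : Int := dSeq n (j + 1) - dSeq n j
-- the change window whose last difference is d_{t-1} (length = min t s)
def keyAt (s : Nat) (n : Int) (t : Nat) : List Int :=
  ((List.range t).map (dfSeq n)).drop (t - s)
-- the (key, digit) contribution events of one buyer over i iterations
def events (s : Nat) (n : Int) (i : Nat) : List (List Int × Int) :=
  (List.range (i - s)).map (fun j => (keyAt s n (s + j), dSeq n (s + j)))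
-- A's last_digit value after i iterations
def lastD (n : Int) : Nat → Option Int
  | 0 => none
  | (i + 1) => some (dSeq n i)

-- canonical first-occurrence accumulation (A's seen-set semantics)
def canon (d : PySem.Dict (List Int) Int) (seen : PySem.Set (List Int)) :
    List (List Int × Int) → PySem.Dict (List Int) Int × PySem.Set (List Int)
  | [] => (d, seen)
  | e :: t =>
    if PySem.Set.contains seen e.1 = true then canon d seen t
    else canon (PySem.Dict.modify d e.1 0 (· + e.2)) (PySem.Set.add seen e.1) t

-- B's dedup decision, abstracted over events
def stepBe (idx : Int) (q : PySem.Dict (List Int) Int × PySem.Dict (List Int) Int)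
    (e : List Int × Int) : PySem.Dict (List Int) Int × PySem.Dict (List Int) Int :=
  if PySem.Dict.get? q.2 e.1 ≠ some idx then
    (PySem.Dict.insert q.1 e.1 (PySem.Dict.getD q.1 e.1 0 + e.2), PySem.Dict.insert q.2 e.1 idx)
  else q

theorem foldl_ignore {α β : Type} (f : α → α) (l : List β) (init : α) :
    l.foldl (fun st _ => f st) init = f^[l.length] init := by
  induction l generalizing init with
  | nil => rfl
  | cons b t ih => simp [List.foldl_cons, ih, Function.iterate_succ_apply]

theorem canon_append (d : PySem.Dict (List Int) Int) (seen : PySem.Set (List Int))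
    (l₁ l₂ : List (List Int × Int)) :
    canon d seen (l₁ ++ l₂) = canon (canon d seen l₁).1 (canon d seen l₁).2 l₂ := by
  induction l₁ generalizing d seen with
  | nil => rfl
  | cons e t ih =>
    simp only [List.cons_append, canon]
    split_ifs with h <;> simp [ih]

theorem stepA_none (s a : Int) (b : List Int) (S : PySem.Set (List Int))
    (D : PySem.Dict (List Int) Int) :
    stepA s (a, b, none, S, D) =
      (pvStep a, b, some (PySem.Int.mod (pvStep a) 10), S, D) := rfl

theorem stepA_some (s a : Int) (b : List Int) (ld : Int) (S : PySem.Set (List Int))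
    (D : PySem.Dict (List Int) Int) :
    stepA s (a, b, some ld, S, D) =
      if (((PySem.List.slice (b ++ [PySem.Int.mod (pvStep a) 10 - ld]) (some (-s)) none).length : Int) = s
          ∧ PySem.Set.contains S (PySem.List.slice (b ++ [PySem.Int.mod (pvStep a) 10 - ld]) (some (-s)) none) = false) then
        (pvStep a,
         PySem.List.slice (b ++ [PySem.Int.mod (pvStep a) 10 - ld]) (some (-s)) none,
         some (PySem.Int.mod (pvStep a) 10),
         PySem.Set.add S (PySem.List.slice (b ++ [PySem.Int.mod (pvStep a) 10 - ld]) (some (-s)) none),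
         PySem.Dict.modify D (PySem.List.slice (b ++ [PySem.Int.mod (pvStep a) 10 - ld]) (some (-s)) none) 0
           (· + PySem.Int.mod (pvStep a) 10))
      else (pvStep a,
            PySem.List.slice (b ++ [PySem.Int.mod (pvStep a) 10 - ld]) (some (-s)) none,
            some (PySem.Int.mod (pvStep a) 10), S, D) := rfl

theorem drop_snoc_drop (L : List Int) (x : Int) (s : Nat) (hs : 0 < s) :
    List.drop ((List.drop (L.length - s) L ++ [x]).length - s) (List.drop (L.length - s) L ++ [x])
      = List.drop (L.length + 1 - s) (L ++ [x]) := by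
  by_cases h : L.length < s
  · have h0 : L.length - s = 0 := by omega
    rw [h0, List.drop_zero]
    have h1 : (L ++ [x]).length - s = L.length + 1 - s := by simp
    rw [h1]
  · have hsl : s ≤ L.length := by omega
    have hlen : (List.drop (L.length - s) L).length = s := by
      rw [List.length_drop]; omega
    have h2 : (List.drop (L.length - s) L ++ [x]).length - s = 1 := by
      simp [hlen]
    rw [h2]
    rw [List.drop_append_of_le_length (by omega : 1 ≤ (List.drop (L.length - s) L).length)]
    rw [List.drop_drop]
    rw [List.drop_append_of_le_length (by omega : L.length + 1 - s ≤ L.length)]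
    have e : (L.length - s) + 1 = L.length + 1 - s := by omega
    rw [e]

theorem A_iter (s : Nat) (hs : 1 ≤ s) (n : Int) (d : PySem.Dict (List Int) Int) :
    ∀ i : Nat,
      (stepA (s : Int))^[i]
        (n, ([] : List Int), (none : Option Int),
         (PySem.Set.empty : PySem.Set (List Int)), d) =
      (pvStep^[i] n, keyAt s n (i - 1), lastD n i,
       (canon d PySem.Set.empty (events s n i)).2,
       (canon d PySem.Set.empty (events s n i)).1) := by
  intro i
  induction i with
  | zero => simp [keyAt, events, canon, lastD]
  | succ m ih =>
    rw [Function.iterate_succ_apply', ih]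
    cases m with
    | zero =>
      have he1 : events s n 1 = [] := by
        unfold events; rw [Nat.sub_eq_zero_of_le hs]; rfl
      have he0 : events s n 0 = [] := by
        unfold events; simp
      simp [stepA_none, lastD, he0, he1, canon, dSeq, keyAt]
    | succ k =>
      simp only [Nat.add_sub_cancel, lastD]
      rw [stepA_some]
      have hd1 : PySem.Int.mod (pvStep (pvStep^[k + 1] n)) 10 = dSeq n (k + 1) := by
        simp [dSeq, Function.iterate_succ_apply']
      rw [hd1]
      have hd2 : dSeq n (k + 1) - dSeq n k = dfSeq n k := rfl
      rw [hd2]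
      have hwin : PySem.List.slice (keyAt s n k ++ [dfSeq n k]) (some (-(s : Int))) none
          = keyAt s n (k + 1) := by
        rw [PySem.List.slice_from_neg_natCast _ s (by omega)]
        have hL : keyAt s n k
            = List.drop (((List.range k).map (dfSeq n)).length - s) ((List.range k).map (dfSeq n)) := by
          simp [keyAt]
        rw [hL, drop_snoc_drop _ _ s (by omega)]
        simp [keyAt, List.range_succ]
      rw [hwin]
      rw [show pvStep (pvStep^[k + 1] n) = pvStep^[k + 1 + 1] n from
        (Function.iterate_succ_apply' pvStep (k + 1) n).symm]
      by_cases hks : s ≤ k + 1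
      · have hkl : (keyAt s n (k + 1)).length = s := by
          simp [keyAt]; omega
        have hev : events s n (k + 1 + 1)
            = events s n (k + 1) ++ [(keyAt s n (k + 1), dSeq n (k + 1))] := by
          unfold events
          rw [show (k + 1 + 1) - s = ((k + 1) - s) + 1 from by omega, List.range_succ,
            List.map_append]
          simp [show s + ((k + 1) - s) = k + 1 from by omega]
        rw [hev, canon_append]
        by_cases hcont :
            PySem.Set.contains ((canon d PySem.Set.empty (events s n (k + 1))).2)
              (keyAt s n (k + 1)) = false
        · rw [if_pos ⟨by rw [hkl], hcont⟩]
          simp only [canon]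
          have hnc : ¬ PySem.Set.contains ((canon d PySem.Set.empty (events s n (k + 1))).2)
              (keyAt s n (k + 1)) = true := by rw [hcont]; simp
          rw [if_neg hnc]
        · have hcont' : PySem.Set.contains ((canon d PySem.Set.empty (events s n (k + 1))).2)
              (keyAt s n (k + 1)) = true := by
            revert hcont; cases PySem.Set.contains ((canon d PySem.Set.empty (events s n (k + 1))).2)
              (keyAt s n (k + 1)) <;> simp
          rw [if_neg (fun hh => hcont hh.2)]
          simp only [canon]
          rw [if_pos hcont']
      · have hkl : (keyAt s n (k + 1)).length = k + 1 := by
          simp [keyAt]; omega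
        have hne : ((keyAt s n (k + 1)).length : Int) ≠ (s : Int) := by
          rw [hkl]
          exact fun hh => (by omega : ¬(k + 1 = s)) (by exact_mod_cast hh)
        rw [if_neg (fun hh => hne hh.1)]
        have hev0 : events s n (k + 1 + 1) = events s n (k + 1) := by
          unfold events
          rw [show (k + 1 + 1) - s = 0 from by omega, show (k + 1) - s = 0 from by omega]
        rw [hev0]

theorem buyerA_eq (s c : Nat) (hs : 1 ≤ s) (d : PySem.Dict (List Int) Int) (n : Int) :
    buyerA (c : Int) (s : Int) d n = (canon d PySem.Set.empty (events s n c)).1 := by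
  unfold buyerA
  rw [foldl_ignore]
  have hlen : (PySem.List.pyRange 0 (c : Int) 1).length = c := by
    rw [PySem.List.pyRange_one]; simp
  rw [hlen, A_iter s hs n d c]

theorem gen_iter (c : Nat) : ∀ (n : Int) (acc : List Int),
    stepGen^[c] (n, acc) = (pvStep^[c] n, acc ++ (List.range c).map (dSeq n)) := by
  induction c with
  | zero => intro n acc; simp
  | succ k ih =>
    intro n acc
    rw [Function.iterate_succ_apply]
    have h1 : stepGen (n, acc) = (pvStep n, acc ++ [PySem.Int.mod (pvStep n) 10]) := rfl
    rw [h1, ih]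
    have h2 : (List.range (k + 1)).map (dSeq n)
        = PySem.Int.mod (pvStep n) 10 :: (List.range k).map (dSeq (pvStep n)) := by
      rw [List.range_succ_eq_map, List.map_cons, List.map_map]
      have hhead : dSeq n 0 = PySem.Int.mod (pvStep n) 10 := by simp [dSeq]
      have htail : (List.range k).map (dSeq n ∘ Nat.succ)
          = (List.range k).map (dSeq (pvStep n)) := by
        apply List.map_congr_left
        intro t _
        simp [dSeq, Function.iterate_succ_apply]
      rw [hhead, htail]
    rw [h2, Function.iterate_succ_apply]
    simp

theorem B_gen (c : Nat) (n : Int) :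
    ((PySem.List.pyRange 0 (c : Int) 1).foldl (fun q (_ : Int) => stepGen q)
      (n, ([] : List Int))).2 = (List.range c).map (dSeq n) := by
  rw [foldl_ignore]
  have hlen : (PySem.List.pyRange 0 (c : Int) 1).length = c := by
    rw [PySem.List.pyRange_one]; simp
  rw [hlen, gen_iter c n []]
  simp

theorem B_diffs (c : Nat) (n : Int) :
    (PySem.List.pyRange 0 ((c : Int) - 1) 1).map
        (fun j => PySem.List.pyGetD ((List.range c).map (dSeq n)) (j + 1) 0
                - PySem.List.pyGetD ((List.range c).map (dSeq n)) j 0)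
      = (List.range (c - 1)).map (dfSeq n) := by
  rw [PySem.List.pyRange_one, List.map_map]
  have ht : (((c : Int) - 1) - 0).toNat = c - 1 := by omega
  rw [ht]
  apply List.map_congr_left
  intro k hk
  have hk' : k < c - 1 := List.mem_range.mp hk
  have e0 : (0 : Int) + (k : Int) = ((k : Nat) : Int) := by ring
  simp only [Function.comp_apply, e0]
  rw [show ((k : Int) + 1) = (((k + 1 : Nat)) : Int) from by push_cast; ring]
  rw [PySem.List.pyGetD_natCast, PySem.List.pyGetD_natCast]
  rw [PySem.List.getD_map_range _ _ _ _ (by omega), PySem.List.getD_map_range _ _ _ _ (by omega)]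
  rfl

theorem B_inner (s c : Nat) (hs : 1 ≤ s) (n : Int) (idx : Int)
    (q : PySem.Dict (List Int) Int × PySem.Dict (List Int) Int) :
    (PySem.List.pyRange (s : Int) (c : Int) 1).foldl
        (stepB idx ((List.range c).map (dSeq n)) ((List.range (c - 1)).map (dfSeq n)) (s : Int)) q
      = (events s n c).foldl (stepBe idx) q := by
  rw [PySem.List.pyRange_one, List.foldl_map]
  have ht : ((c : Int) - (s : Int)).toNat = c - s := by omega
  rw [ht]
  unfold events
  rw [List.foldl_map]
  apply PySem.List.foldl_congr_mem
  intro acc j hj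
  have hj' : j < c - s := List.mem_range.mp hj
  simp only [stepB, stepBe]
  have hkey : PySem.List.slice ((List.range (c - 1)).map (dfSeq n))
      (some ((s : Int) + (j : Int) - (s : Int))) (some ((s : Int) + (j : Int)))
      = keyAt s n (s + j) := by
    have e1 : (s : Int) + (j : Int) - (s : Int) = ((j : Nat) : Int) := by ring
    have e2 : (s : Int) + (j : Int) = (((s + j : Nat)) : Int) := by push_cast; ring
    rw [e1, e2, PySem.List.slice_natCast]
    have e3 : (s + j) - j = s := by omega
    rw [e3]
    unfold keyAt
    have e4 : (s + j) - s = j := by omega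
    rw [e4]
    rw [List.take_drop, ← List.map_take, List.take_range]
    rw [show min (j + s) (c - 1) = s + j from by omega]
  have hdig : PySem.List.pyGetD ((List.range c).map (dSeq n)) ((s : Int) + (j : Int)) 0
      = dSeq n (s + j) := by
    rw [show (s : Int) + (j : Int) = (((s + j : Nat)) : Int) from by push_cast; ring,
      PySem.List.pyGetD_natCast, PySem.List.getD_map_range _ _ _ _ (by omega)]
  rw [hkey, hdig]

theorem buyerB_eq (s c : Nat) (hs : 1 ≤ s)
    (st : PySem.Dict (List Int) Int × PySem.Dict (List Int) Int) (p : Int × Int) :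
    buyerB (c : Int) (s : Int) st p = (events s p.2 c).foldl (stepBe p.1) st := by
  simp only [buyerB]
  rw [B_gen, B_diffs]
  exact B_inner s c hs p.2 p.1 st

theorem sim : ∀ (evs : List (List Int × Int)) (total : PySem.Dict (List Int) Int)
    (seen : PySem.Set (List Int)) (lb : PySem.Dict (List Int) Int) (idx : Int),
    (∀ k, PySem.Set.contains seen k = true ↔ PySem.Dict.get? lb k = some idx) →
    (canon total seen evs).1 = (evs.foldl (stepBe idx) (total, lb)).1
    ∧ ∀ k j, PySem.Dict.get? ((evs.foldl (stepBe idx) (total, lb)).2) k = some j →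
        (PySem.Dict.get? lb k = some j ∨ j = idx) := by
  intro evs
  induction evs with
  | nil =>
    intro total seen lb idx hsl
    exact ⟨rfl, fun k j h => Or.inl h⟩
  | cons e t ih =>
    intro total seen lb idx hsl
    by_cases hmem : PySem.Dict.get? lb e.1 = some idx
    · have hseen : PySem.Set.contains seen e.1 = true := (hsl e.1).mpr hmem
      simp only [canon, hseen, if_true, List.foldl_cons, stepBe, hmem, ne_eq,
        not_true_eq_false, if_false]
      exact ih total seen lb idx hsl
    · have hseen : ¬ PySem.Set.contains seen e.1 = true := fun h => hmem ((hsl e.1).mp h)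
      simp only [canon, List.foldl_cons, stepBe]
      rw [if_neg hseen, if_pos (by exact hmem)]
      have hmi : PySem.Dict.modify total e.1 0 (· + e.2)
          = PySem.Dict.insert total e.1 (PySem.Dict.getD total e.1 0 + e.2) := rfl
      rw [hmi]
      have hsl' : ∀ k, PySem.Set.contains (PySem.Set.add seen e.1) k = true
          ↔ PySem.Dict.get? (PySem.Dict.insert lb e.1 idx) k = some idx := by
        intro k
        rw [PySem.Set.contains_iff, PySem.Set.mem_add, PySem.Dict.get?_insert]
        by_cases hk : k = e.1
        · simp [hk]
        · rw [if_neg hk]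
          constructor
          · rintro (h | h)
            · exact (hsl k).mp ((PySem.Set.contains_iff seen k).mpr h)
            · exact absurd h hk
          · intro h
            exact Or.inl ((PySem.Set.contains_iff seen k).mp ((hsl k).mpr h))
      obtain ⟨h1, h2⟩ := ih (PySem.Dict.insert total e.1 (PySem.Dict.getD total e.1 0 + e.2))
        (PySem.Set.add seen e.1) (PySem.Dict.insert lb e.1 idx) idx hsl'
      refine ⟨h1, fun k j hkj => ?_⟩
      rcases h2 k j hkj with h | h
      · rw [PySem.Dict.get?_insert] at h
        by_cases hk : k = e.1
        · rw [if_pos hk] at h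
          exact Or.inr (by injection h with hh; exact hh.symm)
        · rw [if_neg hk] at h
          exact Or.inl h
      · exact Or.inr h

theorem outer (s c : Nat) (hs : 1 ≤ s) :
    ∀ (nums : List Int) (idx : Int)
      (total lb : PySem.Dict (List Int) Int),
      (∀ k j, PySem.Dict.get? lb k = some j → j < idx) →
      nums.foldl (buyerA (c : Int) (s : Int)) total
        = ((PySem.List.enumerate nums idx).foldl (buyerB (c : Int) (s : Int)) (total, lb)).1 := by
  intro nums
  induction nums with
  | nil =>
    intro idx total lb hlb
    simp [PySem.List.enumerate]
  | cons x xs ih =>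
    intro idx total lb hlb
    rw [PySem.List.enumerate_cons, List.foldl_cons, List.foldl_cons]
    rw [buyerA_eq s c hs, buyerB_eq s c hs]
    have hsl0 : ∀ k, PySem.Set.contains (PySem.Set.empty : PySem.Set (List Int)) k = true
        ↔ PySem.Dict.get? lb k = some idx := by
      intro k
      constructor
      · intro h
        exact absurd h (by simp [PySem.Set.empty, PySem.Set.contains])
      · intro h
        exact absurd (hlb k idx h) (lt_irrefl idx)
    obtain ⟨h1, h2⟩ := sim (events s x c) total PySem.Set.empty lb idx hsl0
    rw [h1]
    have hlb' : ∀ k j,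
        PySem.Dict.get? (((events s x c).foldl (stepBe idx) (total, lb)).2) k = some j →
        j < idx + 1 := by
      intro k j h
      rcases h2 k j h with h' | h'
      · exact lt_trans (hlb k j h') (by omega)
      · omega
    have := ih (idx + 1) (((events s x c).foldl (stepBe idx) (total, lb)).1)
      (((events s x c).foldl (stepBe idx) (total, lb)).2) hlb'
    simpa using this

-- ===== VERDICT (by name: the statement is the Claim_ definition above) =====
theorem get_best_sequence_spec : Claim_equal_get_best_sequence := by
  unfold Claim_equal_get_best_sequence
  intro numbers count seq_size hdom hpre
  obtain ⟨hne, hs1, hsc⟩ := hpre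
  unfold Spec_get_best_sequence
  have hseq : seq_size = ((seq_size.toNat : Nat) : Int) := (Int.toNat_of_nonneg (by omega)).symm
  have hcnt : count = ((count.toNat : Nat) : Int) := (Int.toNat_of_nonneg (by omega)).symm
  have hs : 1 ≤ seq_size.toNat := by omega
  rw [hseq, hcnt]
  unfold get_best_sequence get_best_sequence_alt
  rw [outer seq_size.toNat count.toNat hs numbers 0 PySem.Dict.empty PySem.Dict.empty
    (fun k j h => by rw [PySem.Dict.get?_empty] at h; cases h)]
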